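-- pv_equiv track=rewrite | github.com/lytedev/advent-of-code-2017 | day-3-part-1.py | rect_area
-- ===== SOURCE A (Python) =====
-- def rect_area(target):
--     # generator for nearly-square rectangles (alternating increasing width and
--     # height) up to a certain area (or width * height)
--     # generates tuples in the format [width, height, area (or width * height)]
--     # just passed a target area (or width * height)
--     w, h, a = 1, 1, 1
--     yield w, h, a
--     # effectively handles target = 1
--     while a < target:
--         # increase width by 1
--         w += 1
--         a = w * h
--         yield w, h, a
--         if a >= target:
--             break
--         # increase width by 1
--         h += 1
--         a = w * h
--         yield w, h, a
--         if a >= target: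
--             break
-- ===== SOURCE B (Python) =====
-- def rect_area(target):
--     # single counter: width and height are derived arithmetically from the step index
--     i = 0
--     while True:
--         w = (i + 3) // 2
--         h = (i + 2) // 2
--         a = w * h
--         yield w, h, a
--         if a >= target:
--             break
--         i += 1
-- ===== Notes on version B (the rewrite author's own statement) =====
-- stated objective: alternative
-- what changed: B keeps a single step counter and derives width and height from it arithmetically by floor division each iteration, instead of A's unrolled two-step loop body that mutates width and height separately with a yield and break check per half-step.
import Mathlib
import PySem

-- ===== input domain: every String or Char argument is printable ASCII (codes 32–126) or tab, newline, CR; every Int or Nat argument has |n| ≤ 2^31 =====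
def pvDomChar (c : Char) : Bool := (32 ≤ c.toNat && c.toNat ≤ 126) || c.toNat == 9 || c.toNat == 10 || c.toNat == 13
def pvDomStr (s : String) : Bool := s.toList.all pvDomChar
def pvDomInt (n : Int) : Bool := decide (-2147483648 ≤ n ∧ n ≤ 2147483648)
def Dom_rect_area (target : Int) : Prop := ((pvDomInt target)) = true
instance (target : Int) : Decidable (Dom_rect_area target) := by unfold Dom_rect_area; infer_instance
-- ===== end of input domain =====

-- B keeps a single step counter and derives width and height from it by floor
-- division, instead of mutating them in an unrolled two-step body (alternative decomposition, same cost).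


-- ===== PORT A =====
-- A's while loop, step for step; fuel only makes the recursion structural
-- (the loop always stops before this fuel is exhausted).
def rect_area_loop (fuel : Nat) (target w h a : Int) : List (Int × Int × Int) :=
  match fuel with
  | 0 => []
  | fuel + 1 =>
    if a < target then
      let w' := w + 1
      let a1 := w' * h
      if a1 ≥ target then
        [(w', h, a1)]
      else
        let h' := h + 1
        let a2 := w' * h'
        (w', h, a1) :: (w', h', a2) ::
          (if a2 ≥ target then [] else rect_area_loop fuel target w' h' a2)
    else []

def rect_area (target : Int) : List (Int × Int × Int) :=
  (1, 1, 1) :: rect_area_loop (target.toNat + 1) target 1 1 1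

-- ===== PORT B =====
-- B's while-True loop over the counter i; fuel only makes the recursion structural
-- (the loop always stops before this fuel is exhausted).
def rect_area_alt_loop (fuel : Nat) (target i : Int) : List (Int × Int × Int) :=
  match fuel with
  | 0 => []
  | fuel + 1 =>
    let w := PySem.Int.floordiv (i + 3) 2
    let h := PySem.Int.floordiv (i + 2) 2
    let a := w * h
    (w, h, a) :: (if a ≥ target then [] else rect_area_alt_loop fuel target (i + 1))

def rect_area_alt (target : Int) : List (Int × Int × Int) :=
  rect_area_alt_loop (2 * target.toNat + 2) target 0

-- ===== PRECONDITION & SPEC =====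
def Spec_rect_area (target : Int) (out : List (Int × Int × Int)) : Prop := out = rect_area_alt target
instance (target : Int) (out : List (Int × Int × Int)) : Decidable (Spec_rect_area target out) := by unfold Spec_rect_area; infer_instance

-- ===== CLAIM (what is proved, stated in full; the proofs are below) =====
def Claim_equal_rect_area : Prop := ∀ (target : Int), Dom_rect_area target → Spec_rect_area target (rect_area target)

-- ===== LEMMAS AND PROOFS =====

theorem fd2_of_even (k : Int) (h : 0 ≤ k) : PySem.Int.floordiv (2 * k) 2 = k := by
  rw [PySem.Int.floordiv_eq_ediv_of_pos (by omega)]; omega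

theorem fd2_of_odd (k : Int) (h : 0 ≤ k) : PySem.Int.floordiv (2 * k + 1) 2 = k := by
  rw [PySem.Int.floordiv_eq_ediv_of_pos (by omega)]; omega

-- the core correspondence: A's loop entered with square state (k,k) equals
-- B's loop from counter i = 2k-1, whenever the loop is entered (k*k < target)
-- and both sides carry enough fuel
theorem loop_eq (target : Int) :
    ∀ (n : Nat) (k : Int), 1 ≤ k → k * k < target → (target - k * k).toNat ≤ n →
      ∀ (f1 f2 : Nat), (target - k * k).toNat ≤ f1 → 2 * (target - k * k).toNat ≤ f2 →
      rect_area_loop f1 target k k (k * k) = rect_area_alt_loop f2 target (2 * k - 1) := by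
  intro n
  induction n with
  | zero => intro k hk hlt hle; omega
  | succ m ih =>
    intro k hk hlt hle f1 f2 hf1 hf2
    obtain ⟨g1, rfl⟩ : ∃ g, f1 = g + 1 := ⟨f1 - 1, by omega⟩
    obtain ⟨g2, rfl⟩ : ∃ g, f2 = g + 2 := ⟨f2 - 2, by omega⟩
    rw [rect_area_loop, rect_area_alt_loop]
    have hw : PySem.Int.floordiv (2 * k - 1 + 3) 2 = k + 1 := by
      have : 2 * k - 1 + 3 = 2 * (k + 1) := by ring
      rw [this, fd2_of_even _ (by omega)]
    have hh : PySem.Int.floordiv (2 * k - 1 + 2) 2 = k := by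
      have : 2 * k - 1 + 2 = 2 * k + 1 := by ring
      rw [this, fd2_of_odd _ (by omega)]
    simp only [hw, hh, if_pos hlt]
    by_cases h1 : (k + 1) * k ≥ target
    · simp only [if_pos h1]
    · simp only [if_neg h1, List.cons.injEq, true_and]
      rw [rect_area_alt_loop]
      have hw2 : PySem.Int.floordiv (2 * k - 1 + 1 + 3) 2 = k + 1 := by
        have : 2 * k - 1 + 1 + 3 = 2 * (k + 1) + 1 := by ring
        rw [this, fd2_of_odd _ (by omega)]
      have hh2 : PySem.Int.floordiv (2 * k - 1 + 1 + 2) 2 = k + 1 := by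
        have : 2 * k - 1 + 1 + 2 = 2 * (k + 1) := by ring
        rw [this, fd2_of_even _ (by omega)]
      simp only [hw2, hh2, List.cons.injEq, true_and]
      by_cases h2 : (k + 1) * (k + 1) ≥ target
      · simp only [if_pos h2]
      · simp only [if_neg h2]
        have hsq : (k + 1) * (k + 1) = k * k + 2 * k + 1 := by ring
        have hrec := ih (k + 1) (by omega) (by omega) (by omega) g1 g2
          (by omega) (by omega)
        have harg : 2 * (k + 1) - 1 = 2 * k - 1 + 1 + 1 := by ring
        rw [harg] at hrec
        exact hrec

-- ===== VERDICT (by name: the statement is the Claim_ definition above) =====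
theorem rect_area_spec : Claim_equal_rect_area := by
  intro target _
  unfold Spec_rect_area rect_area rect_area_alt
  rw [rect_area_alt_loop]
  have hw : PySem.Int.floordiv (0 + 3) 2 = 1 := by
    rw [PySem.Int.floordiv_eq_ediv_of_pos (by omega)]; decide
  have hh : PySem.Int.floordiv (0 + 2) 2 = 1 := by
    rw [PySem.Int.floordiv_eq_ediv_of_pos (by omega)]; decide
  simp only [hw, hh, one_mul, List.cons.injEq, true_and]
  by_cases hc : (1:Int) ≥ target
  · rw [if_pos hc, rect_area_loop, if_neg (by omega)]
  · rw [if_neg hc]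
    have h1 : (1:Int) * 1 = 1 := by norm_num
    have := loop_eq target (target - 1).toNat 1 (by omega) (by rw [h1]; omega)
      (by rw [h1]) (target.toNat + 1) (2 * target.toNat + 1)
      (by rw [h1]; omega) (by rw [h1]; omega)
    rw [h1] at this
    exact this.trans (by norm_num)
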